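-- pv_equiv track=rewrite | github.com/bksaini078/DynamicProgramming | HackerRank/Beautiful _Quadruples.py | beautifulQuadruples
-- ===== SOURCE A (Python) =====
-- def beautifulQuadruples(a, b, c, d):
--     #
--     # Write your code here.
--   if a==b==c==d:
--     return 0
--
--   memo={}
--   count = 0
--   for i in range(1,a+1):
--       for j in range(1,b+1):
--           for k in range(1,c+1):
--               for l in range(1,d+1):
--                  key=str(sorted([i,j,k,l]))
--                  if key in memo.keys() or a==b==c==d:
--                     continue
--                  if ((i ^ j ^ k ^ l) != 0):
--                     memo[str(sorted([i,j,k,l]))]= [i,j,k,l]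
--                     count+=1
--   return count
-- ===== SOURCE B (Python) =====
-- def beautifulQuadruples(a, b, c, d):
--     # Sort the bounds once; then count each multiset exactly once by
--     # enumerating only non-decreasing quadruples w <= x <= y <= z fitted
--     # pointwise against the sorted bounds (no dict / dedup needed).
--     p, q, r, s = sorted([a, b, c, d])
--     count = 0
--     for w in range(1, p + 1):
--         for x in range(w, q + 1):
--             for y in range(x, r + 1):
--                 for z in range(y, s + 1):
--                     if w ^ x ^ y ^ z != 0:
--                         count += 1
--     return count
-- ===== Notes on version B (the rewrite author's own statement) =====
-- stated objective: faster
-- what changed: B sorts the four bounds once and enumerates each quadruple multiset exactly once as a non-decreasing quadruple fitted pointwise against the sorted bounds, instead of A's enumeration of all a*b*c*d ordered tuples deduplicated through a dict keyed by str(sorted(...)).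
-- intended difference: When all four bounds are equal and at least 2, A's special-case shortcut 'if a==b==c==d: return 0' returns 0, while B returns the actual positive count of beautiful quadruples (e.g. 2 for bounds 2,2,2,2), which is the intended value of the function. — e.g. on beautifulQuadruples(2, 2, 2, 2): A returns 0, B returns 2
import Mathlib
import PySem

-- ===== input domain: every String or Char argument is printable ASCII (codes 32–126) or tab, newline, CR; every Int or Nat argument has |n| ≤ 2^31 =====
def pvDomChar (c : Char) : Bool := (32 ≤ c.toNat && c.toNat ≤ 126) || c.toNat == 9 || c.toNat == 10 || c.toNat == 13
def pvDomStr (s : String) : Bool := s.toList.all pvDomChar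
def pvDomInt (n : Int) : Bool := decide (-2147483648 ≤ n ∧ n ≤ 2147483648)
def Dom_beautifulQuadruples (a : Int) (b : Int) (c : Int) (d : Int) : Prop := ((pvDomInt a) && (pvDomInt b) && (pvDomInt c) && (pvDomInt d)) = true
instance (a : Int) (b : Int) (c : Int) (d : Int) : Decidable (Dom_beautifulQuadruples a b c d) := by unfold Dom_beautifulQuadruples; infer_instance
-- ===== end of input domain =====

-- B sorts the four bounds once and counts each multiset exactly once by enumerating
-- non-decreasing quadruples against the sorted bounds (no dict/dedup); measurably faster.


-- ===== PORT A =====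
-- A-side helpers: Python's str() of a list of ints ("[1, 2, 3, 4]"), exact.
def pvNatRepr (n : Nat) : List Char :=
  if _h : n < 10 then [Nat.digitChar n]
  else pvNatRepr (n / 10) ++ [Nat.digitChar (n % 10)]
  decreasing_by exact Nat.div_lt_self (by omega) (by omega)

def pvIntRepr (n : Int) : List Char :=
  if n < 0 then '-' :: pvNatRepr (-n).toNat else pvNatRepr n.toNat

def pvCommaJoin : List Int → List Char
  | [] => []
  | [x] => pvIntRepr x
  | x :: y :: rest => pvIntRepr x ++ ',' :: ' ' :: pvCommaJoin (y :: rest)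

def pvListStr (xs : List Int) : String :=
  String.ofList ('[' :: pvCommaJoin xs ++ [']'])

def beautifulQuadruples (a : Int) (b : Int) (c : Int) (d : Int) : Int :=
  if a = b ∧ b = c ∧ c = d then 0
  else
    let st :=
      (PySem.List.pyRange 1 (a+1)).foldl (fun st i =>
        (PySem.List.pyRange 1 (b+1)).foldl (fun st j =>
          (PySem.List.pyRange 1 (c+1)).foldl (fun st k =>
            (PySem.List.pyRange 1 (d+1)).foldl (fun st l =>
              let key := pvListStr (PySem.List.sorted [i, j, k, l] (fun x => x))
              if st.1.contains key = true ∨ (a = b ∧ b = c ∧ c = d) then st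
              else if PySem.Int.bxor (PySem.Int.bxor (PySem.Int.bxor i j) k) l ≠ 0 then
                (st.1.insert (pvListStr (PySem.List.sorted [i, j, k, l] (fun x => x))) [i, j, k, l], st.2 + 1)
              else st) st) st) st)
        ((PySem.Dict.empty : PySem.Dict String (List Int)), (0 : Int))
    st.2

-- ===== PORT B =====
def beautifulQuadruples_alt (a : Int) (b : Int) (c : Int) (d : Int) : Int :=
  match PySem.List.sorted [a, b, c, d] (fun x => x) with
  | [p, q, r, s] =>
    (PySem.List.pyRange 1 (p+1)).foldl (fun count w =>
      (PySem.List.pyRange w (q+1)).foldl (fun count x =>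
        (PySem.List.pyRange x (r+1)).foldl (fun count y =>
          (PySem.List.pyRange y (s+1)).foldl (fun count z =>
            if PySem.Int.bxor (PySem.Int.bxor (PySem.Int.bxor w x) y) z ≠ 0 then count + 1
            else count) count) count) count) 0
  | _ => 0  -- unreachable: sorted of a 4-element list always has 4 elements

-- ===== PRECONDITION & SPEC =====
-- When all four bounds are equal and at least 2, A's shortcut 'if a==b==c==d: return 0'
-- returns 0, while B returns the actual positive count of beautiful quadruples, which is
-- the intended value.
def D_beautifulQuadruples (a : Int) (b : Int) (c : Int) (d : Int) : Prop :=
  b = a ∧ c = a ∧ d = a ∧ 2 ≤ a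
instance (a : Int) (b : Int) (c : Int) (d : Int) : Decidable (D_beautifulQuadruples a b c d) := by
  unfold D_beautifulQuadruples; infer_instance

def Spec_beautifulQuadruples (a : Int) (b : Int) (c : Int) (d : Int) (out : Int) : Prop :=
  ¬ D_beautifulQuadruples a b c d → out = beautifulQuadruples_alt a b c d
instance (a : Int) (b : Int) (c : Int) (d : Int) (out : Int) : Decidable (Spec_beautifulQuadruples a b c d out) := by
  unfold Spec_beautifulQuadruples; infer_instance

def pvDiffWitness_beautifulQuadruples : Int × Int × Int × Int := (2, 2, 2, 2)
def pvDiffWitnessOut_beautifulQuadruples : Int × Int := (0, 2)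

-- ===== CLAIM =====
def Claim_unchanged_beautifulQuadruples : Prop := ∀ (a : Int) (b : Int) (c : Int) (d : Int), Dom_beautifulQuadruples a b c d → Spec_beautifulQuadruples a b c d (beautifulQuadruples a b c d)
def Claim_changed_beautifulQuadruples : Prop := Dom_beautifulQuadruples (pvDiffWitness_beautifulQuadruples.1) (pvDiffWitness_beautifulQuadruples.2.1) (pvDiffWitness_beautifulQuadruples.2.2.1) (pvDiffWitness_beautifulQuadruples.2.2.2) ∧ D_beautifulQuadruples (pvDiffWitness_beautifulQuadruples.1) (pvDiffWitness_beautifulQuadruples.2.1) (pvDiffWitness_beautifulQuadruples.2.2.1) (pvDiffWitness_beautifulQuadruples.2.2.2) ∧ beautifulQuadruples (pvDiffWitness_beautifulQuadruples.1) (pvDiffWitness_beautifulQuadruples.2.1) (pvDiffWitness_beautifulQuadruples.2.2.1) (pvDiffWitness_beautifulQuadruples.2.2.2) = pvDiffWitnessOut_beautifulQuadruples.1 ∧ beautifulQuadruples_alt (pvDiffWitness_beautifulQuadruples.1) (pvDiffWitness_beautifulQuadruples.2.1) (pvDiffWitness_beautifulQuadruples.2.2.1) (pvDiffWitness_beautifulQuadruples.2.2.2)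 = pvDiffWitnessOut_beautifulQuadruples.2 ∧ pvDiffWitnessOut_beautifulQuadruples.1 ≠ pvDiffWitnessOut_beautifulQuadruples.2
def Claim_exact_beautifulQuadruples : Prop := ∀ (a : Int) (b : Int) (c : Int) (d : Int), Dom_beautifulQuadruples a b c d → D_beautifulQuadruples a b c d → beautifulQuadruples a b c d ≠ beautifulQuadruples_alt a b c d

-- ===== LEMMAS AND PROOFS =====

-- The list of all loop tuples of A, and of all canonical (non-decreasing) tuples of B.
def pvTuples (a b c d : Int) : List (Int × Int × Int × Int) :=
  (PySem.List.pyRange 1 (a+1)).flatMap fun i =>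
    (PySem.List.pyRange 1 (b+1)).flatMap fun j =>
      (PySem.List.pyRange 1 (c+1)).flatMap fun k =>
        (PySem.List.pyRange 1 (d+1)).map fun l => (i, j, k, l)

def pvChains (p q r t : Int) : List (Int × Int × Int × Int) :=
  (PySem.List.pyRange 1 (p+1)).flatMap fun w =>
    (PySem.List.pyRange w (q+1)).flatMap fun x =>
      (PySem.List.pyRange x (r+1)).flatMap fun y =>
        (PySem.List.pyRange y (t+1)).map fun z => (w, x, y, z)

def pvXor4 (u : Int × Int × Int × Int) : Int :=
  PySem.Int.bxor (PySem.Int.bxor (PySem.Int.bxor u.1 u.2.1) u.2.2.1) u.2.2.2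

def pvXok (u : Int × Int × Int × Int) : Bool := decide (pvXor4 u ≠ 0)

def pvSKey (u : Int × Int × Int × Int) : List Int :=
  PySem.List.sorted [u.1, u.2.1, u.2.2.1, u.2.2.2] (fun x => x)

def pvKey (u : Int × Int × Int × Int) : String := pvListStr (pvSKey u)

def pvStep (st : PySem.Dict String (List Int) × Int) (u : Int × Int × Int × Int) :
    PySem.Dict String (List Int) × Int :=
  if st.1.contains (pvKey u) = true then st
  else if pvXor4 u ≠ 0 then
    (st.1.insert (pvKey u) [u.1, u.2.1, u.2.2.1, u.2.2.2], st.2 + 1)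
  else st

def pvToL (u : Int × Int × Int × Int) : List Int := [u.1, u.2.1, u.2.2.1, u.2.2.2]

lemma pvCount_inner (P : Int → Prop) [DecidablePred P] (l : List Int) (acc : Int) :
    l.foldl (fun c z => if P z then c + 1 else c) acc
      = acc + ((l.countP (fun z => decide (P z)) : Nat) : Int) := by
  simpa using PySem.List.foldl_count_if (fun z => decide (P z)) l acc

lemma pvA_eq_fold (a b c d : Int) (hne : ¬(a = b ∧ b = c ∧ c = d)) :
    beautifulQuadruples a b c d = ((pvTuples a b c d).foldl pvStep (PySem.Dict.empty, 0)).2 := by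
  unfold beautifulQuadruples
  rw [if_neg hne]
  unfold pvTuples
  simp only [List.foldl_flatMap, List.foldl_map]
  simp only [eq_false hne, or_false]
  rfl

lemma pvStep_inv (L : List (Int × Int × Int × Int)) :
    ∀ (m : PySem.Dict String (List Int)) (n : Int), m.keys.Nodup →
      (L.foldl pvStep (m, n)).2
        = n + ((PySem.Set.update m.keys ((L.filter pvXok).map pvKey)).length : Int)
            - (m.keys.length : Int) := by
  induction L with
  | nil => intro m n _; simp [PySem.Set.update_nil]
  | cons u L ih =>
    intro m n hnd
    rw [List.foldl_cons]
    by_cases hx : pvXor4 u ≠ 0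
    · have hfil : (u :: L).filter pvXok = u :: L.filter pvXok := by
        simp [pvXok, hx]
      rw [hfil, List.map_cons, PySem.Set.update_cons]
      by_cases hc : m.contains (pvKey u) = true
      · have hstep : pvStep (m, n) u = (m, n) := by
          simp [pvStep, hc]
        rw [hstep, PySem.Set.add_of_mem ((PySem.Dict.contains_iff_mem_keys m (pvKey u)).mp hc)]
        exact ih m n hnd
      · have hstep : pvStep (m, n) u
            = (m.insert (pvKey u) [u.1, u.2.1, u.2.2.1, u.2.2.2], n + 1) := by
          simp [pvStep, hc, hx]
        have hnotmem : pvKey u ∉ m.keys := fun hmem =>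
          hc ((PySem.Dict.contains_iff_mem_keys m (pvKey u)).mpr hmem)
        have hcf : m.contains (pvKey u) = false := by
          cases h : m.contains (pvKey u)
          · rfl
          · exact absurd h hc
        have hkeys : (m.insert (pvKey u) [u.1, u.2.1, u.2.2.1, u.2.2.2]).keys
            = m.keys ++ [pvKey u] := PySem.Dict.keys_insert_of_not_contains m _ hcf
        rw [hstep, ih _ (n + 1) (PySem.Dict.nodup_keys_insert m _ _ hnd), hkeys,
            PySem.Set.add_of_not_mem hnotmem]
        rw [List.length_append, List.length_singleton]
        push_cast
        ring
    · have hfil : (u :: L).filter pvXok = L.filter pvXok := by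
        simp [pvXok, hx]
      have hstep : pvStep (m, n) u = (m, n) := by
        unfold pvStep
        split
        · rfl
        · simp
      rw [hfil, hstep]
      exact ih m n hnd

lemma pvA_char (a b c d : Int) (hne : ¬(a = b ∧ b = c ∧ c = d)) :
    beautifulQuadruples a b c d
      = ((PySem.Set.ofList (((pvTuples a b c d).filter pvXok).map pvKey)).length : Int) := by
  rw [pvA_eq_fold a b c d hne,
      pvStep_inv (pvTuples a b c d) PySem.Dict.empty 0 PySem.Dict.nodup_keys_empty]
  rw [PySem.Dict.keys_empty, PySem.Set.update_nil_left]
  simp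

lemma pvAlt_char {a b c d p q r t : Int}
    (h4 : PySem.List.sorted [a, b, c, d] (fun x => x) = [p, q, r, t]) :
    beautifulQuadruples_alt a b c d = (((pvChains p q r t).filter pvXok).length : Int) := by
  simp only [beautifulQuadruples_alt, h4]
  rw [← List.countP_eq_length_filter]
  unfold pvChains
  simp only [Function.comp_def, List.countP_flatMap, List.countP_map, Nat.cast_list_sum,
    List.map_map, pvXok, pvXor4]
  simp only [pvCount_inner, PySem.List.foldl_add]
  simp only [zero_add]
  rfl

lemma pv_mem_tuples {a b c d i j k l : Int} :
    ((i, j, k, l) : Int × Int × Int × Int) ∈ pvTuples a b c d ↔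
      (1 ≤ i ∧ i ≤ a) ∧ (1 ≤ j ∧ j ≤ b) ∧ (1 ≤ k ∧ k ≤ c) ∧ (1 ≤ l ∧ l ≤ d) := by
  simp [pvTuples, List.mem_flatMap, PySem.List.mem_pyRange_one, Prod.ext_iff]

lemma pv_mem_chains {p q r t w x y z : Int} :
    ((w, x, y, z) : Int × Int × Int × Int) ∈ pvChains p q r t ↔
      (1 ≤ w ∧ w ≤ p) ∧ (w ≤ x ∧ x ≤ q) ∧ (x ≤ y ∧ y ≤ r) ∧ (y ≤ z ∧ z ≤ t) := by
  simp [pvChains, List.mem_flatMap, PySem.List.mem_pyRange_one, Prod.ext_iff]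

lemma pvNodup_flatMap_key {α β : Type} [DecidableEq α] (l : List α) (g : α → List β) (key : β → α)
    (hl : l.Nodup) (hg : ∀ x ∈ l, (g x).Nodup) (hk : ∀ x ∈ l, ∀ e ∈ g x, key e = x) :
    (l.flatMap g).Nodup := by
  induction l with
  | nil => simp
  | cons x rest ih =>
    rw [List.flatMap_cons]
    rcases List.nodup_cons.mp hl with ⟨hx, hrest⟩
    refine List.Nodup.append (hg x (by simp)) (ih hrest (fun y hy => hg y (by simp [hy]))
      (fun y hy e he => hk y (by simp [hy]) e he)) ?_
    intro e he1 he2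
    rcases List.mem_flatMap.mp he2 with ⟨y, hy, hey⟩
    have h1 := hk x (by simp) e he1
    have h2 := hk y (by simp [hy]) e hey
    exact hx (h1 ▸ h2 ▸ hy)

lemma pvChains_nodup (p q r t : Int) : (pvChains p q r t).Nodup := by
  unfold pvChains
  refine pvNodup_flatMap_key _ _ (fun u => u.1) (PySem.List.nodup_pyRange_one _ _) ?_ (by
    intro w _ e he
    simp only [List.mem_flatMap, List.mem_map] at he
    rcases he with ⟨x, _, y, _, z, _, rfl⟩
    rfl)
  intro w _
  refine pvNodup_flatMap_key _ _ (fun u => u.2.1) (PySem.List.nodup_pyRange_one _ _) ?_ (by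
    intro x _ e he
    simp only [List.mem_flatMap, List.mem_map] at he
    rcases he with ⟨y, _, z, _, rfl⟩
    rfl)
  intro x _
  refine pvNodup_flatMap_key _ _ (fun u => u.2.2.1) (PySem.List.nodup_pyRange_one _ _) ?_ (by
    intro y _ e he
    simp only [List.mem_map] at he
    rcases he with ⟨z, _, rfl⟩
    rfl)
  intro y _
  exact (PySem.List.nodup_pyRange_one _ _).map (by intro u v h; simpa using h)

lemma pvFits_erase : ∀ {vs bs : List Int}, List.Forall₂ (· ≤ ·) vs bs →
    bs.Pairwise (· ≤ ·) → ∀ m ∈ vs, List.Forall₂ (· ≤ ·) (vs.erase m) bs.tail := by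
  intro vs
  induction vs with
  | nil => intro bs _ _ m hm; simp at hm
  | cons v vt ih =>
    intro bs hf hp m hm
    rcases hf with _ | ⟨hvb, hf⟩
    rename_i b bt
    by_cases hv : v = m
    · subst hv
      rw [List.erase_cons_head]
      simpa using hf
    · rw [List.erase_cons_tail (by simpa using hv)]
      have hm' : m ∈ vt := by
        rcases List.mem_cons.mp hm with h | h
        · exact absurd h.symm hv
        · exact h
      rcases hf with _ | ⟨hvb2, hf2⟩
      · simp at hm'
      · rename_i v2 b2 vt2 bt2
        simp only [List.tail_cons]
        constructor
        · have : b ≤ b2 := (List.pairwise_cons.mp hp).1 b2 (by simp)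
          omega
        · have := ih (List.Forall₂.cons hvb2 hf2) ((List.pairwise_cons.mp hp).2) m hm'
          simpa using this

lemma pvPerm_fits : ∀ {bs bs' : List Int}, bs.Perm bs' → ∀ {vs : List Int},
    List.Forall₂ (· ≤ ·) vs bs → ∃ vs', vs.Perm vs' ∧ List.Forall₂ (· ≤ ·) vs' bs' := by
  intro bs bs' hperm
  induction hperm with
  | nil => intro vs hf; rcases hf; exact ⟨[], List.Perm.refl _, List.Forall₂.nil⟩
  | cons x hrest ih =>
    intro vs hf
    rcases List.forall₂_cons_right_iff.mp hf with ⟨v, vt, hvx, hf2, rfl⟩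
    rcases ih hf2 with ⟨vt', hp, hf'⟩
    exact ⟨v :: vt', hp.cons v, List.Forall₂.cons hvx hf'⟩
  | swap x y l =>
    intro vs hf
    rcases List.forall₂_cons_right_iff.mp hf with ⟨v1, vt, h1, hf2, rfl⟩
    rcases List.forall₂_cons_right_iff.mp hf2 with ⟨v2, vt2, h2, hf3, rfl⟩
    exact ⟨v2 :: v1 :: vt2, List.Perm.swap v2 v1 vt2, List.Forall₂.cons h2 (List.Forall₂.cons h1 hf3)⟩
  | trans h1 h2 ih1 ih2 =>
    intro vs hf
    rcases ih1 hf with ⟨vs1, hp1, hf1⟩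
    rcases ih2 hf1 with ⟨vs2, hp2, hf2⟩
    exact ⟨vs2, hp1.trans hp2, hf2⟩

lemma pvExists_sorted_fits : ∀ (n : Nat) (vs bs : List Int), vs.length = n →
    List.Forall₂ (· ≤ ·) vs bs → bs.Pairwise (· ≤ ·) →
    ∃ ws, ws.Perm vs ∧ ws.Pairwise (· ≤ ·) ∧ List.Forall₂ (· ≤ ·) ws bs := by
  intro n
  induction n with
  | zero =>
    intro vs bs hlen hf _
    rcases List.length_eq_zero_iff.mp hlen with rfl
    rcases hf
    exact ⟨[], List.Perm.refl _, List.Pairwise.nil, List.Forall₂.nil⟩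
  | succ k ih =>
    intro vs bs hlen hf hp
    rcases vs with _ | ⟨v, vt⟩
    · simp at hlen
    rcases hf with _ | ⟨hvb, hfr⟩
    rename_i b bt
    -- m := minimum of v :: vt
    set m := vt.foldl min v with hm
    have hmem : m ∈ v :: vt := by
      rcases PySem.List.foldl_min_mem vt v with h | h
      · rw [hm, h]; simp
      · exact List.mem_cons_of_mem _ (hm ▸ h)
    have hmin : ∀ u ∈ v :: vt, m ≤ u := by
      intro u hu
      rcases List.mem_cons.mp hu with rfl | hu
      · exact (PySem.List.foldl_min_le vt u).1
      · exact (PySem.List.foldl_min_le vt v).2 u hu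
    have hmb : m ≤ b := le_trans (hmin v (by simp)) hvb
    have herase : List.Forall₂ (· ≤ ·) ((v :: vt).erase m) bt := by
      have := pvFits_erase (List.Forall₂.cons hvb hfr) hp m hmem
      simpa using this
    have hlen' : ((v :: vt).erase m).length = k := by
      rw [List.length_erase_of_mem hmem]; simpa using hlen
    rcases ih _ bt hlen' herase (List.pairwise_cons.mp hp).2 with ⟨ws', hperm', hpair', hfit'⟩
    refine ⟨m :: ws', ?_, ?_, List.Forall₂.cons hmb hfit'⟩
    · exact ((hperm'.cons m).trans (List.perm_cons_erase hmem).symm)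
    · rw [List.pairwise_cons]
      exact ⟨fun u hu => hmin u (List.erase_subset (hperm'.subset hu)), hpair'⟩

lemma pvSorted_fits_sorted {vs bs : List Int} (h : List.Forall₂ (· ≤ ·) vs bs) :
    List.Forall₂ (· ≤ ·) (PySem.List.sorted vs (fun x => x)) (PySem.List.sorted bs (fun x => x)) := by
  have hbs : bs.Perm (PySem.List.sorted bs (fun x => x)) :=
    (PySem.List.sorted_perm bs (fun x => x) false).symm
  rcases pvPerm_fits hbs h with ⟨vs', hpv, hfit⟩
  have hpair : (PySem.List.sorted bs (fun x => x)).Pairwise (· ≤ ·) := by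
    have := PySem.List.sorted_pairwise bs (fun x => x)
    simpa using this
  rcases pvExists_sorted_fits vs'.length vs' _ rfl hfit hpair with ⟨ws, hwp, hwpair, hwfit⟩
  have h1 : PySem.List.sorted vs (fun x => x) = PySem.List.sorted ws (fun x => x) :=
    PySem.List.sorted_eq_sorted_of_perm _ _ _ (fun x y h => h) ((hpv.trans hwp.symm).symm).symm
  have h2 : PySem.List.sorted ws (fun x => x) = ws :=
    PySem.List.sorted_eq_self_of_pairwise _ _ (by simpa using hwpair)
  rw [h1, h2]
  exact hwfit

lemma pvXor4_toNat {i j k l : Int} (hi : 0 ≤ i) (hj : 0 ≤ j) (hk : 0 ≤ k) (hl : 0 ≤ l) :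
    pvXor4 (i, j, k, l) =
      (((([i, j, k, l].map Int.toNat).foldl (fun b a => b ^^^ a) 0 : Nat) : Int)) := by
  unfold pvXor4
  rw [PySem.Int.bxor_of_nonneg hi hj,
      PySem.Int.bxor_of_nonneg (by positivity) hk,
      PySem.Int.bxor_of_nonneg (by positivity) hl]
  simp [Nat.zero_xor]

lemma pvXor_perm {i j k l i' j' k' l' : Int}
    (hp : ([i, j, k, l] : List Int).Perm [i', j', k', l'])
    (hnn : ∀ x ∈ ([i, j, k, l] : List Int), 0 ≤ x) :
    pvXor4 (i, j, k, l) = pvXor4 (i', j', k', l') := by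
  have hnn' : ∀ x ∈ ([i', j', k', l'] : List Int), 0 ≤ x := fun x hx => hnn x (hp.symm.subset hx)
  rw [pvXor4_toNat (hnn i (by simp)) (hnn j (by simp)) (hnn k (by simp)) (hnn l (by simp)),
      pvXor4_toNat (hnn' i' (by simp)) (hnn' j' (by simp)) (hnn' k' (by simp)) (hnn' l' (by simp))]
  congr 1
  letI : RightCommutative (fun (b a : Nat) => b ^^^ a) :=
    ⟨fun b a a' => by show (b ^^^ a) ^^^ a' = (b ^^^ a') ^^^ a
                      rw [Nat.xor_assoc, Nat.xor_assoc, Nat.xor_comm a a']⟩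
  exact (hp.map Int.toNat).foldl_eq 0

lemma pvOfList_map_length {α β : Type} [BEq α] [LawfulBEq α] [BEq β] [LawfulBEq β] (f : α → β) (l : List α)
    (hinj : ∀ x ∈ l, ∀ y ∈ l, f x = f y → x = y) :
    (PySem.Set.ofList (l.map f)).length = (PySem.Set.ofList l).length := by
  induction l using List.reverseRecOn with
  | nil => simp
  | append_singleton l x ih =>
    rw [List.map_append, List.map_singleton, PySem.Set.ofList_append_singleton,
        PySem.Set.ofList_append_singleton]
    have hinj' : ∀ y ∈ l, ∀ z ∈ l, f y = f z → y = z := fun y hy z hz =>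
      hinj y (by simp [hy]) z (by simp [hz])
    have hfx : f x ∈ List.map f l ↔ x ∈ l := by
      constructor
      · intro hmem
        rcases List.mem_map.mp hmem with ⟨y, hy, hfy⟩
        exact (hinj y (by simp [hy]) x (by simp) hfy) ▸ hy
      · intro h
        exact List.mem_map_of_mem h
    rw [PySem.Set.add_eq_ite, PySem.Set.add_eq_ite]
    by_cases hx : x ∈ l
    · simp [PySem.Set.mem_ofList, hx, hfx, ih hinj']
    · simp [PySem.Set.mem_ofList, hx, hfx, ih hinj']

lemma pvDigitChar_range : ∀ d : Nat, d < 10 →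
    48 ≤ (Nat.digitChar d).toNat ∧ (Nat.digitChar d).toNat ≤ 57 := by decide

lemma pvDigitChar_inj : ∀ a : Nat, a < 10 → ∀ b : Nat, b < 10 → Nat.digitChar a = Nat.digitChar b → a = b := by
  decide

lemma pvNatRepr_digits (n : Nat) : ∀ c ∈ pvNatRepr n, 48 ≤ c.toNat ∧ c.toNat ≤ 57 := by
  induction n using pvNatRepr.induct with
  | case1 n h =>
    rw [pvNatRepr, dif_pos h]
    intro c hc
    rw [List.mem_singleton] at hc
    subst hc
    exact pvDigitChar_range n h
  | case2 n h ih =>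
    rw [pvNatRepr, dif_neg h]
    intro c hc
    rcases List.mem_append.mp hc with h1 | h1
    · exact ih c h1
    · rw [List.mem_singleton] at h1
      subst h1
      exact pvDigitChar_range _ (Nat.mod_lt _ (by omega))

lemma pvNatRepr_ne_nil (n : Nat) : pvNatRepr n ≠ [] := by
  rw [pvNatRepr]
  split
  · simp
  · simp

lemma pvNatRepr_unfold_lt {n : Nat} (h : n < 10) : pvNatRepr n = [Nat.digitChar n] := by
  rw [pvNatRepr]; exact dif_pos h

lemma pvNatRepr_unfold_ge {n : Nat} (h : ¬ n < 10) :
    pvNatRepr n = pvNatRepr (n / 10) ++ [Nat.digitChar (n % 10)] := by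
  rw [pvNatRepr]; exact dif_neg h

lemma pvNatRepr_inj : ∀ m n : Nat, pvNatRepr m = pvNatRepr n → m = n := by
  intro m
  induction m using Nat.strong_induction_on with
  | _ m ih =>
    intro n h
    by_cases hm : m < 10 <;> by_cases hn : n < 10
    · rw [pvNatRepr_unfold_lt hm, pvNatRepr_unfold_lt hn] at h
      exact pvDigitChar_inj m hm n hn (by simpa using h)
    · rw [pvNatRepr_unfold_lt hm, pvNatRepr_unfold_ge hn] at h
      have h0 : (pvNatRepr (n / 10)).length + 1 = 1 := by
        simpa using (congrArg List.length h).symm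
      have h1 : pvNatRepr (n / 10) = [] := List.length_eq_zero_iff.mp (by omega)
      exact absurd h1 (pvNatRepr_ne_nil _)
    · rw [pvNatRepr_unfold_ge hm, pvNatRepr_unfold_lt hn] at h
      have h0 : (pvNatRepr (m / 10)).length + 1 = 1 := by
        simpa using congrArg List.length h
      have h1 : pvNatRepr (m / 10) = [] := List.length_eq_zero_iff.mp (by omega)
      exact absurd h1 (pvNatRepr_ne_nil _)
    · rw [pvNatRepr_unfold_ge hm, pvNatRepr_unfold_ge hn] at h
      rcases List.append_inj' h (by simp) with ⟨h1, h2⟩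
      have hd : m / 10 = n / 10 := ih (m / 10) (Nat.div_lt_self (by omega) (by omega)) _ h1
      have hm10 : m % 10 = n % 10 :=
        pvDigitChar_inj _ (Nat.mod_lt _ (by omega)) _ (Nat.mod_lt _ (by omega)) (by simpa using h2)
      omega

lemma pvIntRepr_no (n : Int) : ∀ c ∈ pvIntRepr n, c ≠ ',' ∧ c ≠ ']' := by
  unfold pvIntRepr
  split
  · intro c hc
    rcases List.mem_cons.mp hc with rfl | hc
    · exact ⟨by decide, by decide⟩
    · have := pvNatRepr_digits _ c hc
      constructor <;> (intro he; subst he; exact absurd this (by decide))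
  · intro c hc
    have := pvNatRepr_digits _ c hc
    constructor <;> (intro he; subst he; exact absurd this (by decide))

lemma pvIntRepr_inj (m n : Int) (h : pvIntRepr m = pvIntRepr n) : m = n := by
  unfold pvIntRepr at h
  split_ifs at h with h1 h2 h2
  · rw [List.cons_eq_cons] at h
    have := pvNatRepr_inj _ _ h.2
    omega
  · -- '-' :: _ = pvNatRepr n.toNat : head of RHS is a digit
    rcases List.exists_cons_of_ne_nil (pvNatRepr_ne_nil n.toNat) with ⟨c, cs, hc⟩
    rw [hc, List.cons_eq_cons] at h
    have hd := pvNatRepr_digits n.toNat c (by rw [hc]; simp)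
    rw [← h.1] at hd
    exact absurd hd (by decide)
  · rcases List.exists_cons_of_ne_nil (pvNatRepr_ne_nil m.toNat) with ⟨c, cs, hc⟩
    rw [hc, List.cons_eq_cons] at h
    have hd := pvNatRepr_digits m.toNat c (by rw [hc]; simp)
    rw [h.1] at hd
    exact absurd hd (by decide)
  · have := pvNatRepr_inj _ _ h
    omega

lemma pvSplit (c : Char) : ∀ (l1 : List Char) {l2 r1 r2 : List Char}, c ∉ l1 → c ∉ l2 →
    l1 ++ c :: r1 = l2 ++ c :: r2 → l1 = l2 ∧ r1 = r2 := by
  intro l1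
  induction l1 with
  | nil =>
    intro l2 r1 r2 _ h2 h
    cases l2 with
    | nil => simpa using h
    | cons x xs =>
      simp only [List.nil_append, List.cons_append, List.cons_eq_cons] at h
      exact absurd (h.1 ▸ List.mem_cons_self) h2
  | cons x xs ih =>
    intro l2 r1 r2 h1 h2 h
    cases l2 with
    | nil =>
      simp only [List.nil_append, List.cons_append, List.cons_eq_cons] at h
      exact absurd (h.1 ▸ List.mem_cons_self) h1
    | cons y ys =>
      simp only [List.cons_append, List.cons_eq_cons] at h
      rcases h with ⟨rfl, h⟩
      rcases ih (fun hm => h1 (List.mem_cons_of_mem _ hm)) (fun hm => h2 (List.mem_cons_of_mem _ hm)) h with ⟨rfl, rfl⟩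
      exact ⟨rfl, rfl⟩

lemma pvListStr_inj4 (xs ys : List Int) (hx : xs.length = 4) (hy : ys.length = 4)
    (h : pvListStr xs = pvListStr ys) : xs = ys := by
  match xs, hx with
  | [u1, u2, u3, u4], _ =>
  match ys, hy with
  | [w1, w2, w3, w4], _ =>
  have h' := congrArg String.toList h
  rw [pvListStr, pvListStr, String.toList_ofList, String.toList_ofList] at h'
  rcases List.append_inj' h' (by simp) with ⟨hh, _⟩
  have h2 : pvCommaJoin [u1, u2, u3, u4] = pvCommaJoin [w1, w2, w3, w4] := by
    simpa using hh
  simp only [pvCommaJoin] at h2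
  have noC : ∀ n : Int, ',' ∉ pvIntRepr n := fun n hc => (pvIntRepr_no n _ hc).1 rfl
  rcases pvSplit ',' _ (noC u1) (noC w1) h2 with ⟨e1, h3⟩
  rw [List.cons_eq_cons] at h3
  rcases pvSplit ',' _ (noC u2) (noC w2) h3.2 with ⟨e2, h4⟩
  rw [List.cons_eq_cons] at h4
  rcases pvSplit ',' _ (noC u3) (noC w3) h4.2 with ⟨e3, h5⟩
  rw [List.cons_eq_cons] at h5
  rw [pvIntRepr_inj _ _ e1, pvIntRepr_inj _ _ e2, pvIntRepr_inj _ _ e3, pvIntRepr_inj _ _ h5.2]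

lemma pvList4 {l : List Int} (h : l.length = 4) : ∃ a b c d, l = [a, b, c, d] := by
  match l, h with
  | [a, b, c, d], _ => exact ⟨a, b, c, d, rfl⟩

lemma pvToL_inj : Function.Injective pvToL := by
  intro u v h
  simp only [pvToL, List.cons.injEq, and_true] at h
  obtain ⟨h1, h2, h3, h4⟩ := h
  exact Prod.ext h1 (Prod.ext h2 (Prod.ext h3 h4))

lemma pvPairwise4 {w x y z : Int} (h1 : w ≤ x) (h2 : x ≤ y) (h3 : y ≤ z) :
    ([w, x, y, z] : List Int).Pairwise (· ≤ ·) := by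
  refine List.pairwise_cons.mpr ⟨?_, List.pairwise_cons.mpr ⟨?_, List.pairwise_cons.mpr
    ⟨?_, List.pairwise_singleton _ _⟩⟩⟩
  · intro u hu
    simp only [List.mem_cons, List.not_mem_nil, or_false] at hu
    rcases hu with rfl | rfl | rfl <;> omega
  · intro u hu
    simp only [List.mem_cons, List.not_mem_nil, or_false] at hu
    rcases hu with rfl | rfl <;> omega
  · intro u hu
    simp only [List.mem_cons, List.not_mem_nil, or_false] at hu
    rcases hu with rfl
    omega

lemma pvMem_core {a b c d p q r t : Int}
    (h4 : PySem.List.sorted [a, b, c, d] (fun x => x) = [p, q, r, t]) (v : List Int) :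
    (∃ u ∈ (pvTuples a b c d).filter pvXok, pvSKey u = v) ↔
      (∃ u ∈ (pvChains p q r t).filter pvXok, pvToL u = v) := by
  have hperm : ([p, q, r, t] : List Int).Perm [a, b, c, d] := by
    rw [← h4]; exact PySem.List.sorted_perm _ _ _
  constructor
  · rintro ⟨⟨i, j, k, l⟩, hu, hkey⟩
    rcases List.mem_filter.mp hu with ⟨hmem, hok⟩
    rcases pv_mem_tuples.mp hmem with ⟨⟨hi1, hi2⟩, ⟨hj1, hj2⟩, ⟨hk1, hk2⟩, ⟨hl1, hl2⟩⟩
    have hfits : List.Forall₂ (· ≤ ·) [i, j, k, l] [a, b, c, d] := by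
      refine List.Forall₂.cons hi2 (List.Forall₂.cons hj2 (List.Forall₂.cons hk2
        (List.Forall₂.cons hl2 List.Forall₂.nil)))
    have hs := pvSorted_fits_sorted hfits
    rw [h4] at hs
    have hlen : (PySem.List.sorted [i, j, k, l] (fun x => x)).length = 4 := by
      rw [PySem.List.length_sorted]; rfl
    obtain ⟨v1, v2, v3, v4, he⟩ := pvList4 hlen
    rw [he] at hs
    rcases List.forall₂_cons.mp hs with ⟨e1, hs⟩
    rcases List.forall₂_cons.mp hs with ⟨e2, hs⟩
    rcases List.forall₂_cons.mp hs with ⟨e3, hs⟩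
    rcases List.forall₂_cons.mp hs with ⟨e4, _⟩
    have hpairs : ([v1, v2, v3, v4] : List Int).Pairwise (· ≤ ·) := by
      have := PySem.List.sorted_pairwise [i, j, k, l] (fun x => x)
      rw [he] at this
      simpa using this
    have hperm2 : ([i, j, k, l] : List Int).Perm [v1, v2, v3, v4] := by
      rw [← he]; exact (PySem.List.sorted_perm _ _ _).symm
    have hnn : ∀ x ∈ ([i, j, k, l] : List Int), 0 ≤ x := by
      intro x hx
      simp only [List.mem_cons, List.not_mem_nil, or_false] at hx
      rcases hx with rfl | rfl | rfl | rfl <;> omega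
    have hmemv : ∀ x ∈ ([v1, v2, v3, v4] : List Int), 1 ≤ x := by
      intro x hx
      have hx' : x ∈ ([i, j, k, l] : List Int) := hperm2.symm.subset hx
      simp only [List.mem_cons, List.not_mem_nil, or_false] at hx'
      rcases hx' with rfl | rfl | rfl | rfl <;> omega
    have hchain : v1 ≤ v2 ∧ v2 ≤ v3 ∧ v3 ≤ v4 := by
      rcases List.pairwise_cons.mp hpairs with ⟨h12, hp2⟩
      rcases List.pairwise_cons.mp hp2 with ⟨h23, hp3⟩
      rcases List.pairwise_cons.mp hp3 with ⟨h34, _⟩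
      exact ⟨h12 v2 (by simp), h23 v3 (by simp), h34 v4 (by simp)⟩
    have hxorv : pvXor4 (v1, v2, v3, v4) = pvXor4 (i, j, k, l) :=
      (pvXor_perm hperm2 hnn).symm
    refine ⟨(v1, v2, v3, v4), List.mem_filter.mpr ⟨pv_mem_chains.mpr ?_, ?_⟩, ?_⟩
    · exact ⟨⟨hmemv v1 (by simp), e1⟩, ⟨hchain.1, e2⟩, ⟨hchain.2.1, e3⟩, ⟨hchain.2.2, e4⟩⟩
    · simpa only [pvXok, hxorv] using hok
    · rw [← hkey]
      simp only [pvSKey]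
      exact he.symm
  · rintro ⟨⟨w, x, y, z⟩, hu, hkey⟩
    rcases List.mem_filter.mp hu with ⟨hmem, hok⟩
    rcases pv_mem_chains.mp hmem with ⟨⟨hw1, hw2⟩, ⟨hx1, hx2⟩, ⟨hy1, hy2⟩, ⟨hz1, hz2⟩⟩
    have hfits : List.Forall₂ (· ≤ ·) [w, x, y, z] [p, q, r, t] := by
      refine List.Forall₂.cons hw2 (List.Forall₂.cons hx2 (List.Forall₂.cons hy2
        (List.Forall₂.cons hz2 List.Forall₂.nil)))
    rcases pvPerm_fits hperm hfits with ⟨vs', hp, hfit⟩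
    have hlen : vs'.length = 4 := hp.symm.length_eq
    obtain ⟨i, j, k, l, rfl⟩ := pvList4 hlen
    rcases List.forall₂_cons.mp hfit with ⟨e1, hfit⟩
    rcases List.forall₂_cons.mp hfit with ⟨e2, hfit⟩
    rcases List.forall₂_cons.mp hfit with ⟨e3, hfit⟩
    rcases List.forall₂_cons.mp hfit with ⟨e4, _⟩
    have hnnw : ∀ u ∈ ([w, x, y, z] : List Int), 1 ≤ u := by
      intro u hu'
      simp only [List.mem_cons, List.not_mem_nil, or_false] at hu'
      rcases hu' with rfl | rfl | rfl | rfl <;> omega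
    have hmemi : ∀ u ∈ ([i, j, k, l] : List Int), 1 ≤ u := by
      intro u hu'
      exact hnnw u (hp.symm.subset hu')
    have hxori : pvXor4 (i, j, k, l) = pvXor4 (w, x, y, z) := by
      refine (pvXor_perm hp (fun u hu' => by have := hnnw u hu'; omega)).symm
    refine ⟨(i, j, k, l), List.mem_filter.mpr ⟨pv_mem_tuples.mpr ?_, ?_⟩, ?_⟩
    · exact ⟨⟨hmemi i (by simp), e1⟩, ⟨hmemi j (by simp), e2⟩,
        ⟨hmemi k (by simp), e3⟩, ⟨hmemi l (by simp), e4⟩⟩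
    · simpa only [pvXok, hxori] using hok
    · rw [← hkey]
      simp only [pvSKey, pvToL]
      have hsi : PySem.List.sorted [i, j, k, l] (fun u => u)
          = PySem.List.sorted [w, x, y, z] (fun u => u) :=
        PySem.List.sorted_eq_sorted_of_perm _ _ _ (fun u v h => h) hp.symm
      rw [hsi]
      exact PySem.List.sorted_eq_self_of_pairwise _ _
        (by exact pvPairwise4 hx1 hy1 hz1)

lemma pvMain (a b c d : Int) (hne : ¬(a = b ∧ b = c ∧ c = d)) :
    beautifulQuadruples a b c d = beautifulQuadruples_alt a b c d := by
  have hlen : (PySem.List.sorted [a, b, c, d] (fun x => x)).length = 4 := by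
    rw [PySem.List.length_sorted]; rfl
  obtain ⟨p, q, r, t, h4⟩ := pvList4 hlen
  rw [pvA_char a b c d hne, pvAlt_char h4]
  congr 1
  set Lq := (pvTuples a b c d).filter pvXok with hLq
  have hmapmap : Lq.map pvKey = (Lq.map pvSKey).map pvListStr := by
    rw [List.map_map]; rfl
  rw [hmapmap]
  rw [pvOfList_map_length pvListStr (Lq.map pvSKey) (by
    intro xs hxs ys hys hxy
    rcases List.mem_map.mp hxs with ⟨u, _, rfl⟩
    rcases List.mem_map.mp hys with ⟨u', _, rfl⟩
    refine pvListStr_inj4 _ _ ?_ ?_ hxy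
    · rw [pvSKey, PySem.List.length_sorted]; rfl
    · rw [pvSKey, PySem.List.length_sorted]; rfl)]
  have hperm : (PySem.Set.ofList (Lq.map pvSKey)).Perm
      (((pvChains p q r t).filter pvXok).map pvToL) := by
    rw [List.perm_ext_iff_of_nodup (PySem.Set.nodup_ofList _)
      (List.Nodup.map pvToL_inj ((pvChains_nodup p q r t).filter _))]
    intro v
    rw [PySem.Set.mem_ofList, List.mem_map]
    constructor
    · rintro ⟨u, hu, rfl⟩
      rcases (pvMem_core h4 (pvSKey u)).mp ⟨u, hu, rfl⟩ with ⟨w, hw, hww⟩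
      exact List.mem_map.mpr ⟨w, hw, hww⟩
    · intro hv
      rcases List.mem_map.mp hv with ⟨u, hu, rfl⟩
      rcases (pvMem_core h4 (pvToL u)).mpr ⟨u, hu, rfl⟩ with ⟨w, hw, hww⟩
      exact ⟨w, hw, hww⟩
  have hlen2 := hperm.length_eq
  rw [List.length_map] at hlen2
  exact hlen2

lemma pvSorted_const (a : Int) :
    PySem.List.sorted [a, a, a, a] (fun x => x) = [a, a, a, a] :=
  PySem.List.sorted_eq_self_of_pairwise _ _ (by exact pvPairwise4 le_rfl le_rfl le_rfl)

lemma pvAlt_allEq_le_one (a : Int) (ha : a ≤ 1) :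
    beautifulQuadruples_alt a a a a = 0 := by
  by_cases h0 : a ≤ 0
  · rw [pvAlt_char (pvSorted_const a)]
    unfold pvChains
    rw [PySem.List.pyRange_one_eq_nil (by omega)]
    simp
  · have : a = 1 := by omega
    subst this
    decide

lemma pvAlt_pos (a : Int) (ha : 2 ≤ a) : 0 < beautifulQuadruples_alt a a a a := by
  rw [pvAlt_char (pvSorted_const a)]
  have hmem : ((1, 1, 1, 2) : Int × Int × Int × Int) ∈ (pvChains a a a a).filter pvXok := by
    refine List.mem_filter.mpr ⟨pv_mem_chains.mpr ?_, by decide⟩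
    refine ⟨⟨by omega, by omega⟩, ⟨by omega, by omega⟩, ⟨by omega, by omega⟩, ⟨by omega, by omega⟩⟩
  have := List.length_pos_of_mem hmem
  omega

-- ===== VERDICT =====
theorem beautifulQuadruples_spec : Claim_unchanged_beautifulQuadruples := by
  intro a b c d _hdom
  unfold Spec_beautifulQuadruples
  intro hnd
  by_cases hne : a = b ∧ b = c ∧ c = d
  · obtain ⟨h1, h2, h3⟩ := hne
    have ha : a ≤ 1 := by
      by_contra hgt
      exact hnd ⟨by omega, by omega, by omega, by omega⟩
    have hb : b = a := by omega
    have hc : c = a := by omega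
    have hd' : d = a := by omega
    have hB : beautifulQuadruples_alt a b c d = 0 := by
      rw [hb, hc, hd']
      exact pvAlt_allEq_le_one a ha
    rw [hB]
    unfold beautifulQuadruples
    rw [if_pos ⟨h1, h2, h3⟩]
  · rw [pvMain a b c d hne]

theorem beautifulQuadruples_changed : Claim_changed_beautifulQuadruples := by
  unfold Claim_changed_beautifulQuadruples; decide

theorem beautifulQuadruples_tight : Claim_exact_beautifulQuadruples := by
  intro a b c d _hdom hd
  obtain ⟨h1, h2, h3, ha⟩ := hd
  have hA : beautifulQuadruples a b c d = 0 := by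
    unfold beautifulQuadruples
    rw [if_pos ⟨by omega, by omega, by omega⟩]
  have hpos : 0 < beautifulQuadruples_alt a b c d := by
    rw [h1, h2, h3]
    exact pvAlt_pos a ha
  omega
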